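-- pv_equiv track=rewrite | github.com/wobblybits/surprisal | musicmapping.py | _count_element_types
-- ===== SOURCE A (Python) =====
-- from typing import List, Tuple, Dict
--
-- def _count_element_types(elements: List[Dict]) -> Dict[str, int]:
--     """
--     Count the number of each type of musical element.
--
--     Args:
--         elements: List of decoded musical elements
--
--     Returns:
--         Dictionary with counts for each element type
--     """
--     counts = {'notes': 0, 'rests': 0, 'chords': 0}
--     for element in elements:
--         if element['type'] == 'note':
--             counts['notes'] += 1
--         elif element['type'] == 'rest':
--             counts['rests'] += 1
--         elif element['type'] == 'chord':
--             counts['chords'] += 1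
--     return counts
-- ===== SOURCE B (Python) =====
-- from typing import List, Tuple, Dict
--
-- def _count_element_types(elements: List[Dict]) -> Dict[str, int]:
--     def go(xs):
--         if not xs:
--             return (0, 0, 0)
--         if len(xs) == 1:
--             t = xs[0]['type']
--             return (1 if t == 'note' else 0,
--                     1 if t == 'rest' else 0,
--                     1 if t == 'chord' else 0)
--         mid = len(xs) // 2
--         ln, lr, lc = go(xs[:mid])
--         rn, rr, rc = go(xs[mid:])
--         return (ln + rn, lr + rr, lc + rc)
--     n, r, c = go(elements)
--     return {'notes': n, 'rests': r, 'chords': c}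
-- ===== Notes on version B (the rewrite author's own statement) =====
-- stated objective: alternative
-- what changed: Replaces A's linear fold over three hand-incremented dict counters by a recursive divide-and-conquer: split the list in half, count each half independently, and merge by summing the three component counts.
-- outside the precondition, e.g. on _count_element_types([{'pitch': 'C4'}]): A raises KeyError, B raises KeyError
import Mathlib
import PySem

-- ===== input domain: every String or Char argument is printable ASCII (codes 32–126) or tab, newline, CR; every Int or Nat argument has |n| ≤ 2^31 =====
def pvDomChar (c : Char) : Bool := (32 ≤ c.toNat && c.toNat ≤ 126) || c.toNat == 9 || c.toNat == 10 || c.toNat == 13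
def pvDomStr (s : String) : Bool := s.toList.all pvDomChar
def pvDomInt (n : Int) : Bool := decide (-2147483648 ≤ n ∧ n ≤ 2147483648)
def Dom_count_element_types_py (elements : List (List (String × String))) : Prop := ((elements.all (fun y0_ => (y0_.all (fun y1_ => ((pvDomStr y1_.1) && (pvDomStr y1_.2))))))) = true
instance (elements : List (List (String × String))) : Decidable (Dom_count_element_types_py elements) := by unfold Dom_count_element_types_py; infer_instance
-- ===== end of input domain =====

-- B replaces A's linear fold over three hand-incremented counters by a divide-and-conquer recursion
-- (split in half, count each half, merge by summing); return value only.

-- ===== PORT A =====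
-- shorthand for element['type'] as both ports read it (missing key excluded by Pre_)
def cetType (element : List (String × String)) : String :=
  ((PySem.Dict.mk element).get? "type").getD ""

-- loop body of A (the if/elif chain on element['type'])
def cetStep (counts : PySem.Dict String Int) (element : List (String × String)) : PySem.Dict String Int :=
  let t := cetType element
  if t == "note" then counts.modify "notes" 0 (· + 1)
  else if t == "rest" then counts.modify "rests" 0 (· + 1)
  else if t == "chord" then counts.modify "chords" 0 (· + 1)
  else counts

def count_element_types_py (elements : List (List (String × String))) : List (String × Int) :=
  (elements.foldl cetStep
    (PySem.Dict.mk [("notes", (0 : Int)), ("rests", 0), ("chords", 0)])).items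

-- ===== PORT B =====
-- B's recursive helper go: divide and conquer over the list
def cetGo : List (List (String × String)) → Int × Int × Int
  | [] => (0, 0, 0)
  | [e] =>
    let t := cetType e
    ((if t == "note" then 1 else 0),
     (if t == "rest" then 1 else 0),
     (if t == "chord" then 1 else 0))
  | e1 :: e2 :: rest =>
    let xs := e1 :: e2 :: rest
    let mid := xs.length / 2
    let l := cetGo (xs.take mid)
    let r := cetGo (xs.drop mid)
    (l.1 + r.1, l.2.1 + r.2.1, l.2.2 + r.2.2)
termination_by xs => xs.length
decreasing_by
  · simp [List.length_take]; omega
  · simp [List.length_drop]; omega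

def count_element_types_py_alt (elements : List (List (String × String))) : List (String × Int) :=
  let r := cetGo elements
  [("notes", r.1), ("rests", r.2.1), ("chords", r.2.2)]

-- ===== PRECONDITION & SPEC =====
-- Pre_ excludes exactly the elements lacking a 'type' key, on which Python A (and B) raises KeyError.
def Pre_count_element_types_py (elements : List (List (String × String))) : Prop :=
  (elements.all (fun e => e.any (fun p => p.1 == "type"))) = true
instance (elements : List (List (String × String))) : Decidable (Pre_count_element_types_py elements) := by unfold Pre_count_element_types_py; infer_instance
def pvWitness_count_element_types_py : (List (List (String × String))) := [[("type", "note")], [("type", "rest"), ("pitch", "C4")]]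

def Spec_count_element_types_py (elements : List (List (String × String))) (out : List (String × Int)) : Prop := out = count_element_types_py_alt elements
instance (elements : List (List (String × String))) (out : List (String × Int)) : Decidable (Spec_count_element_types_py elements out) := by unfold Spec_count_element_types_py; infer_instance

-- ===== CLAIM (what is proved, stated in full; the proofs are below) =====
def Claim_equal_count_element_types_py : Prop := ∀ (elements : List (List (String × String))), Dom_count_element_types_py elements → Pre_count_element_types_py elements → Spec_count_element_types_py elements (count_element_types_py elements)

-- ===== LEMMAS AND PROOFS =====

lemma cetStep_note (a b c : Int) (e : List (String × String)) (h : cetType e = "note") :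
    cetStep (PySem.Dict.mk [("notes", a), ("rests", b), ("chords", c)]) e =
    PySem.Dict.mk [("notes", a + 1), ("rests", b), ("chords", c)] := by
  simp only [cetStep, h]
  simp [PySem.Dict.modify, PySem.Dict.insert, PySem.Dict.getD, PySem.Dict.get?,
    PySem.Dict.contains]

lemma cetStep_rest (a b c : Int) (e : List (String × String)) (h : cetType e = "rest") :
    cetStep (PySem.Dict.mk [("notes", a), ("rests", b), ("chords", c)]) e =
    PySem.Dict.mk [("notes", a), ("rests", b + 1), ("chords", c)] := by
  simp only [cetStep, h]
  simp [PySem.Dict.modify, PySem.Dict.insert, PySem.Dict.getD, PySem.Dict.get?,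
    PySem.Dict.contains]

lemma cetStep_chord (a b c : Int) (e : List (String × String)) (h : cetType e = "chord") :
    cetStep (PySem.Dict.mk [("notes", a), ("rests", b), ("chords", c)]) e =
    PySem.Dict.mk [("notes", a), ("rests", b), ("chords", c + 1)] := by
  simp only [cetStep, h]
  simp [PySem.Dict.modify, PySem.Dict.insert, PySem.Dict.getD, PySem.Dict.get?,
    PySem.Dict.contains]

lemma cetStep_other (a b c : Int) (e : List (String × String)) (h1 : cetType e ≠ "note")
    (h2 : cetType e ≠ "rest") (h3 : cetType e ≠ "chord") :
    cetStep (PySem.Dict.mk [("notes", a), ("rests", b), ("chords", c)]) e =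
    PySem.Dict.mk [("notes", a), ("rests", b), ("chords", c)] := by
  simp only [cetStep]
  simp [h1, h2, h3]

-- A's loop, started from an arbitrary 3-counter state, adds the per-type counts of the types list.
lemma cet_loop_invariant (elements : List (List (String × String))) (a b c : Int) :
    elements.foldl cetStep (PySem.Dict.mk [("notes", a), ("rests", b), ("chords", c)]) =
    (let types := elements.map cetType
     PySem.Dict.mk [("notes", a + (PySem.List.count types "note" : Int)),
                    ("rests", b + (PySem.List.count types "rest" : Int)),
                    ("chords", c + (PySem.List.count types "chord" : Int))]) := by
  induction elements generalizing a b c with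
  | nil => simp [PySem.List.count]
  | cons e es ih =>
    rw [List.foldl_cons]
    by_cases h1 : cetType e = "note"
    · rw [cetStep_note a b c e h1, ih]
      simp [PySem.List.count, h1]; omega
    · by_cases h2 : cetType e = "rest"
      · rw [cetStep_rest a b c e h2, ih]
        simp [PySem.List.count, h1, h2]; omega
      · by_cases h3 : cetType e = "chord"
        · rw [cetStep_chord a b c e h3, ih]
          simp [PySem.List.count, h1, h2, h3]; omega
        · rw [cetStep_other a b c e h1 h2 h3, ih]
          simp [PySem.List.count, h1, h2, h3]

-- B's divide-and-conquer computes exactly the three per-type counts of the types list.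
lemma cetGo_eq_counts (elements : List (List (String × String))) :
    cetGo elements =
    (let types := elements.map cetType
     ((PySem.List.count types "note" : Int),
      (PySem.List.count types "rest" : Int),
      (PySem.List.count types "chord" : Int))) := by
  induction elements using cetGo.induct with
  | case1 => simp [cetGo, PySem.List.count]
  | case2 e =>
    simp only [cetGo, PySem.List.count, List.map]
    by_cases h1 : cetType e = "note" <;> by_cases h2 : cetType e = "rest" <;>
      by_cases h3 : cetType e = "chord" <;> simp_all [List.count_cons]
  | case3 e1 e2 rest xs mid ih1 ih2 =>
    have hxs : xs = e1 :: e2 :: rest := rfl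
    have hmid : mid = xs.length / 2 := rfl
    rw [cetGo]
    simp only [← hxs, ← hmid]
    rw [ih1, ih2]
    simp only [PySem.List.count]
    conv_rhs => rw [← List.take_append_drop mid xs]
    simp only [List.map_append, List.count_append, Nat.cast_add]

-- ===== VERDICT (by name: the statement is the Claim_ definition above) =====
theorem count_element_types_py_spec : Claim_equal_count_element_types_py := by
  intro elements _ _
  show count_element_types_py elements = count_element_types_py_alt elements
  simp only [count_element_types_py, count_element_types_py_alt, cet_loop_invariant,
    cetGo_eq_counts]
  simp
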